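-- pv_equiv track=rewrite | github.com/OTOYO1020/ChatDev_Intermediate | WareHouse/DD_167__20250518041604/teleportation.py | find_final_town
-- ===== SOURCE A (Python) =====
-- from typing import List
--
-- def find_final_town(N: int, A: List[int], K: int) -> int:
--     # Validate teleport destinations
--     for destination in A:
--         if destination < 1 or destination > N:
--             raise ValueError(f"Teleport destination {destination} is out of bounds. It must be between 1 and {N}.")
--     # Handle edge cases
--     if K == 0:
--         return 1  # If no teleportations, return starting town
--     if N == 1:
--         return 1  # If only one town, return that town regardless of K
--     current_town = 1  # Starting from Town 1
--     visited = {}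
--     steps = 0
--     while steps < K:
--         if current_town in visited:
--             # Cycle detected
--             cycle_length = steps - visited[current_town]
--             remaining_steps = (K - steps) % cycle_length
--             # Move to the town after the remaining steps in the cycle
--             for _ in range(remaining_steps):
--                 current_town = A[current_town - 1]  # Adjusting for 0-indexing
--             return current_town
--         visited[current_town] = steps
--         current_town = A[current_town - 1]  # Adjusting for 0-indexing
--         steps += 1
--     return current_town
-- ===== SOURCE B (Python) =====
-- from typing import List
--
-- def find_final_town(N: int, A: List[int], K: int) -> int:
--     # Validate teleport destinations
--     for destination in A:
--         if destination < 1 or destination > N: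
--             raise ValueError(f"Teleport destination {destination} is out of bounds. It must be between 1 and {N}.")
--     if K == 0:
--         return 1
--     if N == 1:
--         return 1
--     # Binary lifting: up[v-1] is the 2^j-th successor of town v at iteration j.
--     up = list(A)
--     cur = 1
--     k = K
--     while k > 0:
--         if k % 2 == 1:
--             cur = up[cur - 1]
--         k //= 2
--         if k > 0:
--             up = [up[u - 1] for u in up]
--     return cur
-- ===== Notes on version B (the rewrite author's own statement) =====
-- stated objective: alternative
-- what changed: Replaces A's visited-dictionary cycle detection with binary lifting: a successor table is repeatedly squared and the bits of K select which power-of-two jumps to apply from town 1.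
-- outside the precondition, e.g. on find_final_town(3, [1, 3], 2): A returns 1, B raises IndexError
import Mathlib
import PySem

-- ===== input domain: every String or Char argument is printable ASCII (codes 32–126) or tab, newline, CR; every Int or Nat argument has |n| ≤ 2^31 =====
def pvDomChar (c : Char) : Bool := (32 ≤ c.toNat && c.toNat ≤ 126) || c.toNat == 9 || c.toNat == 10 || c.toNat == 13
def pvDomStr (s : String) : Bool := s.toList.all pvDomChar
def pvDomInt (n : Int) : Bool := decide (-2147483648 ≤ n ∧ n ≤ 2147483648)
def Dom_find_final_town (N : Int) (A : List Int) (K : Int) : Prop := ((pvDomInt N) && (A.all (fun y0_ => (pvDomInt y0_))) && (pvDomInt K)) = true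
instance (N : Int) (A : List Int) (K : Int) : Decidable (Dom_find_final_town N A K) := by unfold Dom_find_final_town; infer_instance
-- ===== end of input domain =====

-- B replaces A's visited-dictionary cycle detection with binary lifting (repeated squaring of the
-- successor table driven by the bits of K); equal return values on Pre_ (alternative decomposition, no speed claim).


-- ===== PORT A =====
-- A[t - 1] (0-indexed teleport step); exact under Pre_, which keeps every index in range
def telestep (A : List Int) (t : Int) : Int := PySem.List.pyGetD A (t - 1) 0

-- "for _ in range(remaining_steps): current_town = A[current_town - 1]"
def repTele (A : List Int) (cur : Int) : Nat → Int
  | 0 => cur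
  | r + 1 => repTele A (telestep A cur) r

-- the "while steps < K" loop with the visited dictionary and cycle shortcut
def loopA (A : List Int) (K : Int) (visited : PySem.Dict Int Int) (cur steps : Int) : Int :=
  if steps < K then
    match PySem.Dict.get? visited cur with
    | some s0 =>
        let c := steps - s0
        let rem := PySem.Int.mod (K - steps) c
        repTele A cur rem.toNat
    | none => loopA A K (visited.insert cur steps) (telestep A cur) (steps + 1)
  else cur
termination_by (K - steps).toNat
decreasing_by omega

-- A's validation loop only raises (ValueError) or falls through; the raising inputs are outside Pre_.
def find_final_town (N : Int) (A : List Int) (K : Int) : Int :=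
  if K == 0 then 1
  else if N == 1 then 1
  else loopA A K PySem.Dict.empty 1 0

-- ===== PORT B =====
-- up[t - 1]: one jump through the current lifting table
def liftStep (up : List Int) (t : Int) : Int := PySem.List.pyGetD up (t - 1) 0

-- "while k > 0: if k % 2 == 1: cur = up[cur-1]; k //= 2; if k > 0: up = [up[u-1] for u in up]"
def blLoop (up : List Int) (cur k : Int) : Int :=
  if 0 < k then
    blLoop
      (if 0 < PySem.Int.floordiv k 2 then up.map (fun u => liftStep up u) else up)
      (if PySem.Int.mod k 2 == 1 then liftStep up cur else cur)
      (PySem.Int.floordiv k 2)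
  else cur
termination_by k.toNat
decreasing_by
  simp only [PySem.Int.floordiv_eq_ediv_of_pos (by omega : (0:Int) < 2)]; omega

def find_final_town_alt (N : Int) (A : List Int) (K : Int) : Int :=
  if K == 0 then 1
  else if N == 1 then 1
  else blLoop A 1 K

-- ===== PRECONDITION & SPEC =====
-- Pre_ excludes inputs where A raises: a destination outside [1, N] (ValueError) and inputs whose
-- walk runs off the end of A (IndexError when a destination exceeds len(A)).  It is slightly
-- narrower than A's exact return domain: with K ≥ 2 and some destination > len(A), A may still
-- return if its own walk avoids that entry, but B's full lifting table then indexes out of range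
-- and raises IndexError (see cites).
def Pre_find_final_town (N : Int) (A : List Int) (K : Int) : Prop :=
  (∀ a ∈ A, 1 ≤ a ∧ a ≤ N) ∧
  (K ≤ 0 ∨ N = 1 ∨ (1 ≤ (A.length : Int) ∧ K = 1) ∨
    (1 ≤ (A.length : Int) ∧ ∀ a ∈ A, a ≤ (A.length : Int)))
instance (N : Int) (A : List Int) (K : Int) : Decidable (Pre_find_final_town N A K) := by
  unfold Pre_find_final_town; infer_instance

def pvWitness_find_final_town : Int × List Int × Int := (3, ([2, 3, 1], 5))

def Spec_find_final_town (N : Int) (A : List Int) (K : Int) (out : Int) : Prop := out = find_final_town_alt N A K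
instance (N : Int) (A : List Int) (K : Int) (out : Int) : Decidable (Spec_find_final_town N A K out) := by unfold Spec_find_final_town; infer_instance

-- ===== CLAIM (what is proved, stated in full; the proofs are below) =====
def Claim_equal_find_final_town : Prop := ∀ (N : Int) (A : List Int) (K : Int), Dom_find_final_town N A K → Pre_find_final_town N A K → Spec_find_final_town N A K (find_final_town N A K)

-- ===== LEMMAS AND PROOFS =====

theorem repTele_iterate (A : List Int) (cur : Int) (r : Nat) :
    repTele A cur r = (telestep A)^[r] cur := by
  induction r generalizing cur with
  | zero => rfl
  | succ r ih => simp [repTele, ih, Function.iterate_succ_apply]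

theorem loopA_eq (A : List Int) (K : Int) :
    ∀ (n : Nat) (visited : PySem.Dict Int Int) (cur steps : Int),
      (K - steps).toNat ≤ n →
      0 ≤ steps → steps ≤ K →
      cur = (telestep A)^[steps.toNat] 1 →
      (∀ t s, visited.get? t = some s → 0 ≤ s ∧ s < steps ∧ t = (telestep A)^[s.toNat] 1) →
      loopA A K visited cur steps = (telestep A)^[K.toNat] 1 := by
  intro n
  induction n with
  | zero =>
    intro visited cur steps hfuel h0 hK hcur _
    have hnlt : ¬ steps < K := by omega
    rw [loopA, if_neg hnlt, hcur]
    have : steps = K := by omega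
    rw [this]
  | succ n ih =>
    intro visited cur steps hfuel h0 hK hcur hvis
    by_cases hlt : steps < K
    · rw [loopA, if_pos hlt]
      cases hget : PySem.Dict.get? visited cur with
      | none =>
        apply ih _ _ _ (by omega) (by omega) (by omega)
        · rw [hcur]
          have he : (steps + 1).toNat = steps.toNat + 1 := by omega
          rw [he, Function.iterate_succ_apply']
        · intro t s hts
          by_cases ht : t = cur
          · subst ht
            rw [PySem.Dict.get?_insert_self] at hts
            obtain rfl : steps = s := Option.some.inj hts
            exact ⟨h0, by omega, hcur⟩
          · rw [PySem.Dict.get?_insert_of_ne _ _ ht] at hts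
            obtain ⟨hs1, hs2, hs3⟩ := hvis t s hts
            exact ⟨hs1, by omega, hs3⟩
      | some s0 =>
        dsimp only
        obtain ⟨hs00, hs0lt, hcur0⟩ := hvis cur s0 hget
        have hcpos : (0:Int) < steps - s0 := by omega
        have hr0 : 0 ≤ PySem.Int.mod (K - steps) (steps - s0) := PySem.Int.mod_nonneg _ hcpos
        have hrlt : PySem.Int.mod (K - steps) (steps - s0) < steps - s0 := PySem.Int.mod_lt _ hcpos
        set c : Int := steps - s0 with hc
        set rem : Int := PySem.Int.mod (K - steps) c with hrem
        rw [repTele_iterate, hcur, ← Function.iterate_add_apply]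
        -- periodicity of the iterate beyond step s0
        have hkey : (telestep A)^[steps.toNat] 1 = (telestep A)^[s0.toNat] 1 := by
          rw [← hcur, hcur0]
        have hper : ∀ d : Nat, (telestep A)^[d + steps.toNat] 1 = (telestep A)^[d + s0.toNat] 1 := by
          intro d
          rw [Function.iterate_add_apply, Function.iterate_add_apply, hkey]
        have hmul : ∀ (j m : Nat), s0.toNat ≤ m →
            (telestep A)^[m + c.toNat * j] 1 = (telestep A)^[m] 1 := by
          intro j
          induction j with
          | zero => intro m _; simp
          | succ j ihj =>
            intro m hm
            have hstep : steps.toNat = s0.toNat + c.toNat := by omega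
            have hmu : c.toNat * (j + 1) = c.toNat * j + c.toNat := by ring
            have he : m + c.toNat * (j + 1) = (m - s0.toNat + c.toNat * j) + steps.toNat := by omega
            rw [he, hper (m - s0.toNat + c.toNat * j)]
            have he2 : m - s0.toNat + c.toNat * j + s0.toNat = m + c.toNat * j := by omega
            rw [he2, ihj m hm]
        -- K - steps = c * q + rem with q ≥ 0
        set q : Int := PySem.Int.floordiv (K - steps) c with hq
        have hq0 : 0 ≤ q := (PySem.Int.le_floordiv_iff_mul_le hcpos).2 (by omega)
        have hdiv : q * c + rem = K - steps := PySem.Int.floordiv_mul_add_mod (K - steps) c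
        have hcast : K - steps = ((c.toNat * q.toNat + rem.toNat : Nat) : Int) := by
          push_cast [Int.toNat_of_nonneg hq0, Int.toNat_of_nonneg (le_of_lt hcpos),
            Int.toNat_of_nonneg hr0]
          linarith [hdiv]
        have hexp : rem.toNat + steps.toNat + c.toNat * q.toNat = K.toNat := by omega
        rw [← hexp]
        exact (hmul q.toNat (rem.toNat + steps.toNat) (by omega)).symm
    · rw [loopA, if_neg hlt, hcur]
      have : steps = K := by omega
      rw [this]

theorem blLoop_eq (L : Int) :
    ∀ (n : Nat) (k : Int) (up : List Int) (h : Int → Int) (cur : Int),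
      k.toNat ≤ n →
      ((up.length : Int) = L) →
      (∀ t, 1 ≤ t → t ≤ L → PySem.List.pyGetD up (t - 1) 0 = h t) →
      (∀ t, 1 ≤ t → t ≤ L → 1 ≤ h t ∧ h t ≤ L) →
      1 ≤ cur → cur ≤ L →
      blLoop up cur k = h^[k.toNat] cur := by
  intro n
  induction n with
  | zero =>
    intro k up h cur hkn _ _ _ _ _
    have hk : ¬ 0 < k := by omega
    rw [blLoop, if_neg hk]
    have : k.toNat = 0 := by omega
    rw [this, Function.iterate_zero_apply]
  | succ n ih =>
    intro k up h cur hkn hlen hrep hclo hc1 hc2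
    by_cases hk : 0 < k
    · rw [blLoop, if_pos hk]
      have hmod : PySem.Int.mod k 2 = k % 2 := PySem.Int.mod_eq_emod_of_pos (by omega)
      have hfd : PySem.Int.floordiv k 2 = k / 2 := PySem.Int.floordiv_eq_ediv_of_pos (by omega)
      have hcur' : (if PySem.Int.mod k 2 == 1 then liftStep up cur else cur)
          = (if k % 2 = 1 then h cur else cur) := by
        rw [hmod]
        by_cases ho : k % 2 = 1
        · simp only [ho, if_pos]
          simp only [beq_self_eq_true, if_pos]
          exact hrep cur hc1 hc2
        · simp [ho]
      have hcurmem : 1 ≤ (if k % 2 = 1 then h cur else cur) ∧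
          (if k % 2 = 1 then h cur else cur) ≤ L := by
        by_cases ho : k % 2 = 1 <;> simp [ho]
        · exact hclo cur hc1 hc2
        · exact ⟨hc1, hc2⟩
      by_cases hk' : 0 < PySem.Int.floordiv k 2
      · -- square the table and recurse with h ∘ h
        have hrep2 : ∀ t, 1 ≤ t → t ≤ L →
            PySem.List.pyGetD (up.map (fun u => liftStep up u)) (t - 1) 0 = (h ∘ h) t := by
          intro t h1 h2
          have h0 : (0:Int) ≤ t - 1 := by omega
          have hlt : t - 1 < ((up.map (fun u => liftStep up u)).length : Int) := by
            rw [List.length_map]; omega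
          rw [PySem.List.pyGetD_eq_getElem _ _ h0 hlt]
          have hltu : t - 1 < ((up.length : Int)) := by omega
          rw [List.getElem_map]
          have hup : up[(t-1).toNat] = h t := by
            rw [← PySem.List.pyGetD_eq_getElem up (0:Int) h0 hltu]
            exact hrep t h1 h2
          rw [hup]
          obtain ⟨hh1, hh2⟩ := hclo t h1 h2
          exact hrep (h t) hh1 hh2
        have hclo2 : ∀ t, 1 ≤ t → t ≤ L → 1 ≤ (h ∘ h) t ∧ (h ∘ h) t ≤ L := by
          intro t h1 h2
          obtain ⟨hh1, hh2⟩ := hclo t h1 h2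
          exact hclo (h t) hh1 hh2
        rw [if_pos hk', hcur']
        have hrec := ih (PySem.Int.floordiv k 2) (up.map (fun u => liftStep up u)) (h ∘ h)
          (if k % 2 = 1 then h cur else cur)
          (by rw [hfd]; omega) (by rw [List.length_map]; exact hlen) hrep2 hclo2
          hcurmem.1 hcurmem.2
        rw [hrec]
        -- (h ∘ h)^[m] = h^[2*m]
        have hhh : (h ∘ h) = h^[2] := by
          ext x; rw [Function.iterate_succ, Function.iterate_one]
        rw [hhh, ← Function.iterate_mul]
        by_cases ho : k % 2 = 1
        · simp only [ho, if_pos]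
          have he : k.toNat = 2 * (PySem.Int.floordiv k 2).toNat + 1 := by rw [hfd]; omega
          rw [he, Function.iterate_succ_apply]
        · have he : k.toNat = 2 * (PySem.Int.floordiv k 2).toNat := by rw [hfd]; omega
          rw [he]
          simp [ho]
      · -- k = 1: last bit, table untouched
        have hk1 : k = 1 := by rw [hfd] at hk'; omega
        rw [if_neg hk', hcur']
        have hrec := ih (PySem.Int.floordiv k 2) up h (if k % 2 = 1 then h cur else cur)
          (by rw [hfd]; omega) hlen hrep hclo hcurmem.1 hcurmem.2
        rw [hrec]
        have hz : (PySem.Int.floordiv k 2).toNat = 0 := by rw [hfd]; omega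
        rw [hz, Function.iterate_zero_apply, hk1]
        norm_num
    · rw [blLoop, if_neg hk]
      have : k.toNat = 0 := by omega
      rw [this, Function.iterate_zero_apply]

-- ===== VERDICT (by name: the statement is the Claim_ definition above) =====
theorem find_final_town_spec : Claim_equal_find_final_town := by
  intro N A K _ hpre
  unfold Spec_find_final_town find_final_town find_final_town_alt
  obtain ⟨hb, hcase⟩ := hpre
  by_cases hK0 : K = 0
  · simp [hK0]
  by_cases hN1 : N = 1
  · simp [hK0, hN1]
  simp only [beq_iff_eq, if_neg hK0, if_neg hN1]
  by_cases hKpos : 0 < K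
  · rcases hcase with h | h | ⟨hL1, hK1⟩ | ⟨hL1, hbl⟩
    · omega
    · exact absurd h hN1
    · -- K = 1: one step for both, no table squaring
      subst hK1
      have hA := loopA_eq A 1 1 PySem.Dict.empty 1 0 (by omega) le_rfl (by omega)
        (by norm_num)
        (by intro t s hts; simp [PySem.Dict.get?, PySem.Dict.empty] at hts)
      rw [hA]
      rw [blLoop, if_pos (by omega : (0:Int) < 1)]
      have h2 : PySem.Int.floordiv 1 2 = 0 := by decide
      have h3 : (PySem.Int.mod 1 2 == 1) = true := by decide
      rw [h2, h3]
      simp only [lt_irrefl, if_pos]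
      rw [blLoop, if_neg (by omega : ¬ (0:Int) < 0)]
      norm_num
      rfl
    · have hclo : ∀ t, 1 ≤ t → t ≤ (A.length : Int) →
          1 ≤ telestep A t ∧ telestep A t ≤ (A.length : Int) := by
        intro t h1 h2
        have hmem : telestep A t ∈ A := by
          apply PySem.List.pyGetD_mem
          constructor <;> omega
        exact ⟨(hb _ hmem).1, hbl _ hmem⟩
      have hA := loopA_eq A K K.toNat PySem.Dict.empty 1 0 (by omega) le_rfl (by omega)
        (by norm_num)
        (by intro t s hts; simp [PySem.Dict.get?, PySem.Dict.empty] at hts)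
      have hB := blLoop_eq (A.length : Int) K.toNat K A (telestep A) 1 le_rfl rfl
        (fun t _ _ => rfl) hclo le_rfl hL1
      rw [hA, hB]
  · have hKneg : K < 0 := by omega
    rw [loopA, blLoop, if_neg (by omega : ¬ (0:Int) < K), if_neg (by omega : ¬ (0:Int) < K)]
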